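-- pv_equiv track=rewrite | github.com/TonyKing0504/Kaggle-Harmonizing-the-data-of-your-data | pipeline_v9.py | fmt_instrument
-- ===== SOURCE A (Python) =====
-- INSTRUMENT_FMT = {
--     "q exactive hf-x":       "NT=Q Exactive HF-X;AC=MS:1002877",
--     "q exactive hf":          "AC=MS:1002523;NT=Q Exactive HF",
--     "q exactive plus":        "NT=Q Exactive Plus;AC=MS:1001911",
--     "q exactive":             "NT=Q Exactive;AC=MS:1001911",
--     "orbitrap fusion lumos":  "NT=Orbitrap Fusion Lumos;AC=MS:1002731",
--     "orbitrap fusion":        "AC=MS:1000639;NT=Orbitrap Fusion",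
--     "orbitrap exploris 480":  "NT=Orbitrap Exploris 480;AC=MS:1003028",
--     "exploris 480":           "NT=Orbitrap Exploris 480;AC=MS:1003028",
--     "orbitrap astral":        "NT=Orbitrap Astral;AC=MS:1003378",
--     "orbitrap eclipse":       "NT=Orbitrap Eclipse;AC=MS:1003029",
--     "ltq orbitrap elite":     "AC=MS:1001910;NT=LTQ Orbitrap Elite",
--     "orbitrap elite":         "AC=MS:1001910;NT=LTQ Orbitrap Elite",
--     "ltq orbitrap velos":     "AC=MS:1001742;NT=LTQ Orbitrap Velos",
--     "orbitrap velos":         "AC=MS:1001742;NT=LTQ Orbitrap Velos",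
--     "ltq orbitrap xl":        "AC=MS:1000447;NT=LTQ Orbitrap XL",
--     "ltq orbitrap":           "NT=LTQ Orbitrap;AC=MS:1000449",
--     "timstof pro":            "NT=timsTOF Pro;AC=MS:1003005",
--     "timstof":                "NT=timsTOF;AC=MS:1002817",
--     "tripletof 6600":         "NT=TripleTOF 6600;AC=MS:1002533",
--     "tripletof 5600":         "NT=TripleTOF 5600+;AC=MS:1000931",
--     "zeno tof 7600":          "NT=Zeno TOF 7600;AC=MS:1003027",
--     "synapt":                 "NT=Synapt MS;AC=MS:1001490",
--     "astral":                 "NT=Orbitrap Astral;AC=MS:1003378",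
-- }
--
-- def fmt_instrument(name, acc=""):
--     n = name.lower().strip()
--     for key in sorted(INSTRUMENT_FMT.keys(), key=len, reverse=True):
--         if key in n:
--             return INSTRUMENT_FMT[key]
--     if acc:
--         return f"NT={name};AC={acc}"
--     return name
-- ===== SOURCE B (Python) =====
-- INSTRUMENT_FMT = {
--     "q exactive hf-x":       "NT=Q Exactive HF-X;AC=MS:1002877",
--     "q exactive hf":          "AC=MS:1002523;NT=Q Exactive HF",
--     "q exactive plus":        "NT=Q Exactive Plus;AC=MS:1001911",
--     "q exactive":             "NT=Q Exactive;AC=MS:1001911",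
--     "orbitrap fusion lumos":  "NT=Orbitrap Fusion Lumos;AC=MS:1002731",
--     "orbitrap fusion":        "AC=MS:1000639;NT=Orbitrap Fusion",
--     "orbitrap exploris 480":  "NT=Orbitrap Exploris 480;AC=MS:1003028",
--     "exploris 480":           "NT=Orbitrap Exploris 480;AC=MS:1003028",
--     "orbitrap astral":        "NT=Orbitrap Astral;AC=MS:1003378",
--     "orbitrap eclipse":       "NT=Orbitrap Eclipse;AC=MS:1003029",
--     "ltq orbitrap elite":     "AC=MS:1001910;NT=LTQ Orbitrap Elite",
--     "orbitrap elite":         "AC=MS:1001910;NT=LTQ Orbitrap Elite",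
--     "ltq orbitrap velos":     "AC=MS:1001742;NT=LTQ Orbitrap Velos",
--     "orbitrap velos":         "AC=MS:1001742;NT=LTQ Orbitrap Velos",
--     "ltq orbitrap xl":        "AC=MS:1000447;NT=LTQ Orbitrap XL",
--     "ltq orbitrap":           "NT=LTQ Orbitrap;AC=MS:1000449",
--     "timstof pro":            "NT=timsTOF Pro;AC=MS:1003005",
--     "timstof":                "NT=timsTOF;AC=MS:1002817",
--     "tripletof 6600":         "NT=TripleTOF 6600;AC=MS:1002533",
--     "tripletof 5600":         "NT=TripleTOF 5600+;AC=MS:1000931",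
--     "zeno tof 7600":          "NT=Zeno TOF 7600;AC=MS:1003027",
--     "synapt":                 "NT=Synapt MS;AC=MS:1001490",
--     "astral":                 "NT=Orbitrap Astral;AC=MS:1003378",
-- }
--
-- def fmt_instrument(name, acc=""):
--     n = name.lower().strip()
--     best_len = -1
--     best_val = None
--     for k, v in INSTRUMENT_FMT.items():
--         if len(k) > best_len and k in n:
--             best_len = len(k)
--             best_val = v
--     if best_val is not None:
--         return best_val
--     return f"NT={name};AC={acc}" if acc else name
-- ===== Notes on version B (the rewrite author's own statement) =====
-- stated objective: simpler
-- what changed: B replaces A's per-call length-descending sort plus first-substring-hit scan by a single accumulator pass over the dict items that keeps the value of the first key of maximal length matching the normalized name (strict '>' reproduces A's stable-sort insertion-order tie-break), so no sort and no final dict lookup are performed.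
import Mathlib
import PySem

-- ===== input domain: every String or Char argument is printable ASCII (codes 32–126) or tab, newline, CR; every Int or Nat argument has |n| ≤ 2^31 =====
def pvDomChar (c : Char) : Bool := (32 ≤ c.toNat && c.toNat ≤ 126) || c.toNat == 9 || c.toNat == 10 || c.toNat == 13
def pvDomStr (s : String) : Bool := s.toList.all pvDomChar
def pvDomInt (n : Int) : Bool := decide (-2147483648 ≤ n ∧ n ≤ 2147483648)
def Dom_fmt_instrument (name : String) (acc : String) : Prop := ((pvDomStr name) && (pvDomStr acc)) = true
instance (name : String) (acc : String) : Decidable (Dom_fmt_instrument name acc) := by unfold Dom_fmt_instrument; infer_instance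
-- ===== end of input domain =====

-- B replaces A's per-call length-descending key sort + first-substring-hit scan by one accumulator
-- pass over the dict items keeping the value of the first longest matching key (simpler; same results).

-- shared module constant (data only)
def INSTRUMENT_FMT : PySem.Dict String String := PySem.Dict.ofList [
  ("q exactive hf-x",       "NT=Q Exactive HF-X;AC=MS:1002877"),
  ("q exactive hf",         "AC=MS:1002523;NT=Q Exactive HF"),
  ("q exactive plus",       "NT=Q Exactive Plus;AC=MS:1001911"),
  ("q exactive",            "NT=Q Exactive;AC=MS:1001911"),
  ("orbitrap fusion lumos", "NT=Orbitrap Fusion Lumos;AC=MS:1002731"),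
  ("orbitrap fusion",       "AC=MS:1000639;NT=Orbitrap Fusion"),
  ("orbitrap exploris 480", "NT=Orbitrap Exploris 480;AC=MS:1003028"),
  ("exploris 480",          "NT=Orbitrap Exploris 480;AC=MS:1003028"),
  ("orbitrap astral",       "NT=Orbitrap Astral;AC=MS:1003378"),
  ("orbitrap eclipse",      "NT=Orbitrap Eclipse;AC=MS:1003029"),
  ("ltq orbitrap elite",    "AC=MS:1001910;NT=LTQ Orbitrap Elite"),
  ("orbitrap elite",        "AC=MS:1001910;NT=LTQ Orbitrap Elite"),
  ("ltq orbitrap velos",    "AC=MS:1001742;NT=LTQ Orbitrap Velos"),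
  ("orbitrap velos",        "AC=MS:1001742;NT=LTQ Orbitrap Velos"),
  ("ltq orbitrap xl",       "AC=MS:1000447;NT=LTQ Orbitrap XL"),
  ("ltq orbitrap",          "NT=LTQ Orbitrap;AC=MS:1000449"),
  ("timstof pro",           "NT=timsTOF Pro;AC=MS:1003005"),
  ("timstof",               "NT=timsTOF;AC=MS:1002817"),
  ("tripletof 6600",        "NT=TripleTOF 6600;AC=MS:1002533"),
  ("tripletof 5600",        "NT=TripleTOF 5600+;AC=MS:1000931"),
  ("zeno tof 7600",         "NT=Zeno TOF 7600;AC=MS:1003027"),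
  ("synapt",                "NT=Synapt MS;AC=MS:1001490"),
  ("astral",                "NT=Orbitrap Astral;AC=MS:1003378")]

-- ===== PORT A =====
-- for-loop with early return ported as find? over the sorted key list; key present in the dict, so [] ported via get?/getD
def fmt_instrument (name : String) (acc : String) : String :=
  let n := PySem.Str.strip (PySem.Str.lower name)
  match (PySem.List.sorted (PySem.Dict.keys INSTRUMENT_FMT) PySem.Str.len true).find?
      (fun key => PySem.Str.isIn key n) with
  | some key => (PySem.Dict.get? INSTRUMENT_FMT key).getD ""
  | none => if acc ≠ "" then "NT=" ++ name ++ ";AC=" ++ acc else name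

-- ===== PORT B =====
-- the for k, v loop with (best_len, best_val) state, as structural recursion on the item list
def scanBest (n : String) : List (String × String) → Int → Option String → Option String
  | [], _, best => best
  | (k, v) :: rest, bestLen, best =>
      if PySem.Str.len k > bestLen && PySem.Str.isIn k n then
        scanBest n rest (PySem.Str.len k) (some v)
      else
        scanBest n rest bestLen best

def fmt_instrument_alt (name : String) (acc : String) : String :=
  let n := PySem.Str.strip (PySem.Str.lower name)
  match scanBest n (PySem.Dict.items INSTRUMENT_FMT) (-1) none with
  | some v => v
  | none => if acc ≠ "" then "NT=" ++ name ++ ";AC=" ++ acc else name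

-- ===== PRECONDITION & SPEC =====
def Spec_fmt_instrument (name : String) (acc : String) (out : String) : Prop := out = fmt_instrument_alt name acc
instance (name : String) (acc : String) (out : String) : Decidable (Spec_fmt_instrument name acc out) := by unfold Spec_fmt_instrument; infer_instance

-- ===== CLAIM (what is proved, stated in full; the proofs are below) =====
def Claim_equal_fmt_instrument : Prop := ∀ (name : String) (acc : String), Dom_fmt_instrument name acc → Spec_fmt_instrument name acc (fmt_instrument name acc)

-- ===== LEMMAS AND PROOFS =====

-- stable length-descending insertion sort (proof-side model of A's sorted key list)
def insLen (x : String) : List String → List String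
  | [] => [x]
  | y :: t => if PySem.Str.len x < PySem.Str.len y then y :: insLen x t else x :: y :: t

def isortLen : List String → List String
  | [] => []
  | h :: t => insLen h (isortLen t)

lemma max?_cons_cons (x f : String) (rest : List String) :
    PySem.List.max? (x :: f :: rest) PySem.Str.len
      = PySem.List.max? ((if PySem.Str.len x < PySem.Str.len f then f else x) :: rest) PySem.Str.len := by
  simp only [PySem.List.max?, List.foldl_cons]
  congr 1
  split_ifs <;> rfl

lemma max?_cons (fs : List String) : ∀ x : String,
    PySem.List.max? (x :: fs) PySem.Str.len =
      some (match PySem.List.max? fs PySem.Str.len with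
            | none => x
            | some m => if PySem.Str.len x < PySem.Str.len m then m else x) := by
  induction fs with
  | nil => intro x; rfl
  | cons f rest ih =>
    intro x
    rw [max?_cons_cons, ih, ih]
    cases hm : PySem.List.max? rest PySem.Str.len with
    | none => split_ifs <;> first | rfl | simp_all
    | some m =>
      split_ifs <;> (try simp_all) <;> (try split_ifs) <;> (try simp_all) <;> (try omega)

lemma mem_insLen {z x : String} {M : List String} (h : z ∈ insLen x M) : z = x ∨ z ∈ M := by
  induction M with
  | nil => simpa [insLen] using h
  | cons y t ih =>
    by_cases hc : PySem.Str.len x < PySem.Str.len y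
    · simp only [insLen, if_pos hc, List.mem_cons] at h
      rcases h with rfl | h2
      · exact Or.inr List.mem_cons_self
      · rcases ih h2 with rfl | hz
        · exact Or.inl rfl
        · exact Or.inr (List.mem_cons_of_mem _ hz)
    · simp only [insLen, if_neg hc, List.mem_cons] at h
      simpa [List.mem_cons] using h

lemma pairwise_insLen {x : String} {M : List String}
    (h : M.Pairwise (fun a b => PySem.Str.len b ≤ PySem.Str.len a)) :
    (insLen x M).Pairwise (fun a b => PySem.Str.len b ≤ PySem.Str.len a) := by
  induction M with
  | nil => simp [insLen]
  | cons y t ih =>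
    rcases List.pairwise_cons.mp h with ⟨hy, ht⟩
    by_cases hc : PySem.Str.len x < PySem.Str.len y
    · simp only [insLen, if_pos hc]
      refine List.pairwise_cons.mpr ⟨?_, ih ht⟩
      intro z hz
      rcases mem_insLen hz with rfl | hzt
      · exact le_of_lt hc
      · exact hy z hzt
    · simp only [insLen, if_neg hc]
      refine List.pairwise_cons.mpr ⟨?_, List.pairwise_cons.mpr ⟨hy, ht⟩⟩
      intro z hz
      rcases List.mem_cons.mp hz with rfl | hzt
      · exact not_lt.mp hc
      · exact le_trans (hy z hzt) (not_lt.mp hc)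

lemma pairwise_isortLen (L : List String) :
    (isortLen L).Pairwise (fun a b => PySem.Str.len b ≤ PySem.Str.len a) := by
  induction L with
  | nil => simp [isortLen]
  | cons h t ih => exact pairwise_insLen ih

lemma find?_insLen_neg (p : String → Bool) (x : String) (M : List String) (hx : p x = false) :
    (insLen x M).find? p = M.find? p := by
  induction M with
  | nil => simp [insLen, List.find?, hx]
  | cons y t ih =>
    by_cases hc : PySem.Str.len x < PySem.Str.len y
    · simp only [insLen, if_pos hc]
      by_cases hy : p y
      · rw [List.find?_cons_of_pos hy, List.find?_cons_of_pos hy]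
      · rw [List.find?_cons_of_neg (by simp [hy]), List.find?_cons_of_neg (by simp [hy]), ih]
    · simp only [insLen, if_neg hc]
      rw [List.find?_cons_of_neg (by simp [hx])]

lemma find?_insLen_pos (p : String → Bool) (x : String) (M : List String)
    (hM : M.Pairwise (fun a b => PySem.Str.len b ≤ PySem.Str.len a)) (hx : p x = true) :
    (insLen x M).find? p =
      some (match M.find? p with
            | none => x
            | some m => if PySem.Str.len x < PySem.Str.len m then m else x) := by
  induction M with
  | nil => simp [insLen, List.find?, hx]
  | cons y t ih =>
    rcases List.pairwise_cons.mp hM with ⟨hy, ht⟩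
    by_cases hc : PySem.Str.len x < PySem.Str.len y
    · simp only [insLen, if_pos hc]
      by_cases hpy : p y
      · rw [List.find?_cons_of_pos hpy, List.find?_cons_of_pos hpy]
        show some y = some (if PySem.Str.len x < PySem.Str.len y then y else x)
        rw [if_pos hc]
      · rw [List.find?_cons_of_neg (by simp [hpy]), List.find?_cons_of_neg (by simp [hpy]), ih ht]
    · simp only [insLen, if_neg hc]
      rw [List.find?_cons_of_pos hx]
      by_cases hpy : p y
      · rw [List.find?_cons_of_pos hpy]
        show some x = some (if PySem.Str.len x < PySem.Str.len y then y else x)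
        rw [if_neg hc]
      · rw [List.find?_cons_of_neg (by simp [hpy])]
        cases hfind : t.find? p with
        | none => rfl
        | some m =>
          have hm : m ∈ t := List.mem_of_find?_eq_some hfind
          have hlt : PySem.Str.len m ≤ PySem.Str.len x := le_trans (hy m hm) (not_lt.mp hc)
          show some x = some (if PySem.Str.len x < PySem.Str.len m then m else x)
          rw [if_neg (not_lt.mpr hlt)]

lemma find?_isortLen (L : List String) (p : String → Bool) :
    (isortLen L).find? p = PySem.List.max? (L.filter p) PySem.Str.len := by
  induction L with
  | nil => simp [isortLen]; rfl
  | cons h t ih =>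
    by_cases hp : p h
    · rw [isortLen, find?_insLen_pos p h (isortLen t) (pairwise_isortLen t) hp, ih,
        List.filter_cons_of_pos hp, max?_cons]
    · rw [isortLen, find?_insLen_neg p h (isortLen t) (by simp [hp]), ih,
        List.filter_cons_of_neg (by simp [hp])]

lemma sorted_keys_eq :
    PySem.List.sorted (PySem.Dict.keys INSTRUMENT_FMT) PySem.Str.len true
      = isortLen (PySem.Dict.keys INSTRUMENT_FMT) := by decide

-- the accumulator loop of B computes the value at the first longest matching key
lemma scanBest_eq (n : String) :
    ∀ (items : List (String × String)) (bl : Int) (best : Option String),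
    scanBest n items bl best =
      match PySem.List.max? ((items.map Prod.fst).filter (fun k => PySem.Str.isIn k n)) PySem.Str.len with
      | none => best
      | some m => if bl < PySem.Str.len m
                  then (items.find? (fun kv => kv.1 == m)).map Prod.snd
                  else best := by
  intro items
  induction items with
  | nil => intro bl best; rfl
  | cons kv rest ih =>
    obtain ⟨k, v⟩ := kv
    intro bl best
    have hmap : ((k, v) :: rest).map Prod.fst = k :: rest.map Prod.fst := rfl
    have hstep : scanBest n ((k, v) :: rest) bl best =
        if (PySem.Str.len k > bl && PySem.Str.isIn k n) then
          scanBest n rest (PySem.Str.len k) (some v)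
        else scanBest n rest bl best := rfl
    rw [hmap, hstep]
    by_cases hp : PySem.Str.isIn k n
    · rw [show List.filter (fun x => PySem.Str.isIn x n) (k :: rest.map Prod.fst)
            = k :: List.filter (fun x => PySem.Str.isIn x n) (rest.map Prod.fst)
          from List.filter_cons_of_pos hp, max?_cons]
      by_cases hgt : bl < PySem.Str.len k
      · have hct : (PySem.Str.len k > bl && PySem.Str.isIn k n) = true := by
          rw [decide_eq_true hgt, hp]; rfl
        rw [if_pos hct, ih]
        cases hm : PySem.List.max? ((rest.map Prod.fst).filter (fun k => PySem.Str.isIn k n)) PySem.Str.len with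
        | none =>
          simp only [hm]
          rw [if_pos hgt, List.find?_cons_of_pos (by simp)]
          simp
        | some m' =>
          simp only [hm]
          by_cases hlt : PySem.Str.len k < PySem.Str.len m'
          · rw [if_pos hlt, if_pos hlt, if_pos (lt_trans hgt hlt)]
            have hne : ((k, v).1 == m') = false := by
              simp only [beq_eq_false_iff_ne]; intro he; rw [he] at hlt; omega
            rw [List.find?_cons_of_neg (by simpa using hne)]
          · rw [if_neg hlt, if_neg hlt, if_pos hgt, List.find?_cons_of_pos (by simp)]
            simp
      · have hcf : (PySem.Str.len k > bl && PySem.Str.isIn k n) = false := by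
          rw [decide_eq_false hgt, Bool.false_and]
        rw [if_neg (show ¬ ((PySem.Str.len k > bl && PySem.Str.isIn k n) = true) by rw [hcf]; decide), ih]
        cases hm : PySem.List.max? ((rest.map Prod.fst).filter (fun k => PySem.Str.isIn k n)) PySem.Str.len with
        | none =>
          simp only [hm]
          rw [if_neg (by omega)]
        | some m' =>
          simp only [hm]
          by_cases hlt : PySem.Str.len k < PySem.Str.len m'
          · rw [if_pos hlt]
            have hne : ((k, v).1 == m') = false := by
              simp only [beq_eq_false_iff_ne]; intro he; rw [he] at hlt; omega
            by_cases hbl : bl < PySem.Str.len m'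
            · rw [if_pos hbl, if_pos hbl, List.find?_cons_of_neg (by simpa using hne)]
            · rw [if_neg hbl, if_neg hbl]
          · rw [if_neg hlt, if_neg (by omega : ¬ bl < PySem.Str.len m'), if_neg hgt]
    · have hb : PySem.Str.isIn k n = false := by
        cases h : PySem.Str.isIn k n
        · rfl
        · exact absurd h hp
      have hcf : (PySem.Str.len k > bl && PySem.Str.isIn k n) = false := by
        rw [hb, Bool.and_false]
      rw [if_neg (show ¬ ((PySem.Str.len k > bl && PySem.Str.isIn k n) = true) by rw [hcf]; decide), ih]
      rw [show List.filter (fun x => PySem.Str.isIn x n) (k :: rest.map Prod.fst)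
            = List.filter (fun x => PySem.Str.isIn x n) (rest.map Prod.fst)
          from List.filter_cons_of_neg (by rw [hb]; decide)]
      cases hm : PySem.List.max? ((rest.map Prod.fst).filter (fun k => PySem.Str.isIn k n)) PySem.Str.len with
      | none => simp only [hm]
      | some m' =>
        simp only [hm]
        have hmm' : m' ∈ (rest.map Prod.fst).filter (fun k => PySem.Str.isIn k n) :=
          PySem.List.max?_mem hm
        have hpm' : PySem.Str.isIn m' n := by
          have := List.of_mem_filter hmm'; simpa using this
        have hne : ((k, v).1 == m') = false := by
          simp only [beq_eq_false_iff_ne]; intro he; rw [he] at hp; exact hp hpm'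
        by_cases hbl : bl < PySem.Str.len m'
        · rw [if_pos hbl, if_pos hbl, List.find?_cons_of_neg (by simpa using hne)]
        · rw [if_neg hbl, if_neg hbl]

lemma keys_eq_items_fst :
    PySem.Dict.keys INSTRUMENT_FMT = (PySem.Dict.items INSTRUMENT_FMT).map Prod.fst := by decide

-- per-key facts about the literal table: positive length, and first-match value = dict lookup
lemma key_facts : ∀ m ∈ PySem.Dict.keys INSTRUMENT_FMT,
    0 < PySem.Str.len m ∧
    ((PySem.Dict.items INSTRUMENT_FMT).find? (fun kv => kv.1 == m)).map Prod.snd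
      = some ((PySem.Dict.get? INSTRUMENT_FMT m).getD "") := by decide

-- ===== VERDICT (by name: the statement is the Claim_ definition above) =====
theorem fmt_instrument_spec : Claim_equal_fmt_instrument := by
  intro name acc _
  unfold Spec_fmt_instrument fmt_instrument fmt_instrument_alt
  simp only [sorted_keys_eq, find?_isortLen, scanBest_eq, ← keys_eq_items_fst]
  cases hm : PySem.List.max?
      ((PySem.Dict.keys INSTRUMENT_FMT).filter (fun k => PySem.Str.isIn k (PySem.Str.strip (PySem.Str.lower name)))) PySem.Str.len with
  | none => rfl
  | some m =>
    have hmem : m ∈ PySem.Dict.keys INSTRUMENT_FMT :=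
      List.mem_of_mem_filter (PySem.List.max?_mem hm)
    obtain ⟨hlen, hval⟩ := key_facts m hmem
    simp only [if_pos (by omega : (-1 : Int) < PySem.Str.len m), hval]
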